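-- pv_equiv track=rewrite | github.com/kunjinkao55/nju-sicp-notes-2024fall | lab/lab03ddl1014/lab03.py | is_monotone
-- ===== SOURCE A (Python) =====
-- def is_monotone(n):
--     """Returns whether n has monotone digits.
--     Implement using recursion!
--
--     >>> is_monotone(22000130)
--     False
--     >>> is_monotone(1234)
--     True
--     >>> is_monotone(24555)
--     True
--     >>> # Do not use while/for loops!
--     >>> from construct_check import check
--     >>> # ban iteration
--     >>> check(LAB_SOURCE_FILE, 'is_monotone', ['While', 'For'])
--     True
--     """
--     if n/10==0:
--         return True
--     a=n%10
--     b=n//10%10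
--     if a>=b:
--         return is_monotone(n//10)
--     else:
--         return False
-- ===== SOURCE B (Python) =====
-- def is_monotone(n):
--     # Iterative re-implementation: negatives have no monotone digit string -> False;
--     # otherwise peel least-significant digit pairs in a loop.
--     if n < 0:
--         return False
--     while n > 0:
--         if n % 10 < n // 10 % 10:
--             return False
--         n //= 10
--     return True
-- ===== Notes on version B (the rewrite author's own statement) =====
-- stated objective: simpler
-- what changed: Replaces the recursion (with its float-equality base test n/10==0) by a plain iterative digit-peeling loop, with an explicit early False for negative inputs.
-- outside the precondition, e.g. on is_monotone(-1): A raises RecursionError, B returns False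
import Mathlib
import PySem

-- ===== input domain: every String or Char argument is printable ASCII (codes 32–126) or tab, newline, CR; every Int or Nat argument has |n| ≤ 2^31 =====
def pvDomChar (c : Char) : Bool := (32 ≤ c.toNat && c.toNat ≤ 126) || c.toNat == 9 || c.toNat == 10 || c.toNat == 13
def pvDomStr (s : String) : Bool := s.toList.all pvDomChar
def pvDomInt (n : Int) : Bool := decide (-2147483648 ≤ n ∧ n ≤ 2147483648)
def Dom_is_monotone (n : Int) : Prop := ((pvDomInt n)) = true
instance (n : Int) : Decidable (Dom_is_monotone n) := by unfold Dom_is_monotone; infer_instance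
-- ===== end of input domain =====

-- B replaces A's recursion by an iterative digit-peeling loop (negatives return False directly);
-- return-value equivalence is proved for all ints except n = -1, where A raises RecursionError.


-- ===== PORT A =====
-- Literal port of A's recursion. On n = -1 the Python self-recurses forever (RecursionError);
-- fuel n.natAbs + 1 makes the Lean function total and is enough to reproduce the Python value on
-- every input where the Python returns (fuel exhaustion, returning false, is reached only at n = -1).
-- A's base test 'n/10==0' is float division: it holds exactly when n == 0 (for |n| ≤ 2^31).
def isMonoFuel : Nat → Int → Bool
  | 0, _ => false
  | fuel + 1, n =>
    if n = 0 then true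
    else
      let a := PySem.Int.mod n 10
      let b := PySem.Int.mod (PySem.Int.floordiv n 10) 10
      if a ≥ b then isMonoFuel fuel (PySem.Int.floordiv n 10)
      else false

def is_monotone (n : Int) : Bool := isMonoFuel (n.natAbs + 1) n

-- ===== PORT B =====
-- the while-loop of Source B, as structural recursion on the shrinking n
def altLoop (n : Int) : Bool :=
  if _h : n > 0 then
    if PySem.Int.mod n 10 < PySem.Int.mod (PySem.Int.floordiv n 10) 10 then false
    else altLoop (PySem.Int.floordiv n 10)
  else true
termination_by n.toNat
decreasing_by
  have h10 := PySem.Int.floordiv_mul_add_mod n 10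
  have h1 := PySem.Int.mod_nonneg n (b := 10) (by omega)
  have h2 := PySem.Int.mod_lt n (b := 10) (by omega)
  omega

def is_monotone_alt (n : Int) : Bool :=
  if n < 0 then false else altLoop n

-- ===== PRECONDITION & SPEC =====
-- Pre_ excludes only n = -1: there A recurses on itself forever and raises RecursionError (B returns False).
def Pre_is_monotone (n : Int) : Prop := n ≠ -1
instance (n : Int) : Decidable (Pre_is_monotone n) := by unfold Pre_is_monotone; infer_instance
def pvWitness_is_monotone : Int := (24555)

def Spec_is_monotone (n : Int) (out : Bool) : Prop := out = is_monotone_alt n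
instance (n : Int) (out : Bool) : Decidable (Spec_is_monotone n out) := by unfold Spec_is_monotone; infer_instance

-- ===== CLAIM (what is proved, stated in full; the proofs are below) =====
def Claim_equal_is_monotone : Prop := ∀ (n : Int), Dom_is_monotone n → Pre_is_monotone n → Spec_is_monotone n (is_monotone n)

-- ===== LEMMAS AND PROOFS =====

-- with enough fuel, A's recursion on a nonnegative n computes B's loop
theorem isMonoFuel_nonneg (fuel : Nat) (n : Int) (hn : 0 ≤ n) (hf : n.toNat < fuel) :
    isMonoFuel fuel n = altLoop n := by
  induction fuel generalizing n with
  | zero => omega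
  | succ f ih =>
    rw [altLoop]
    by_cases h0 : n = 0
    · simp [isMonoFuel, h0]
    · have hpos : n > 0 := by omega
      have h10 := PySem.Int.floordiv_mul_add_mod n 10
      have h1 := PySem.Int.mod_nonneg n (b := 10) (by omega)
      have h2 := PySem.Int.mod_lt n (b := 10) (by omega)
      have hmlt : (PySem.Int.floordiv n 10).toNat < n.toNat := by omega
      have hmnn : 0 ≤ PySem.Int.floordiv n 10 := by omega
      simp only [isMonoFuel, if_neg h0, hpos, dite_true]
      by_cases hab : PySem.Int.mod n 10 ≥ PySem.Int.mod (PySem.Int.floordiv n 10) 10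
      · rw [if_pos hab, if_neg (by omega), ih _ hmnn (by omega)]
      · rw [if_neg hab, if_pos (by omega)]

-- A's recursion returns false on every n ≤ -2 (the chain climbs towards -1 but never reaches it)
theorem isMonoFuel_neg (fuel : Nat) (n : Int) (hn : n ≤ -2) (hf : (-1 - n).toNat < fuel) :
    isMonoFuel fuel n = false := by
  induction fuel generalizing n with
  | zero => omega
  | succ f ih =>
    have h10 := PySem.Int.floordiv_mul_add_mod n 10
    have h1 := PySem.Int.mod_nonneg n (b := 10) (by omega)
    have h2 := PySem.Int.mod_lt n (b := 10) (by omega)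
    simp only [isMonoFuel, if_neg (by omega : ¬ n = 0)]
    by_cases hab : PySem.Int.mod n 10 ≥ PySem.Int.mod (PySem.Int.floordiv n 10) 10
    · rw [if_pos hab]
      -- the recursive argument m = n // 10 satisfies m ≤ -2: m = -1 would force n = -1
      have hm1 := PySem.Int.mod_nonneg (PySem.Int.floordiv n 10) (b := 10) (by omega)
      have hm2 := PySem.Int.mod_lt (PySem.Int.floordiv n 10) (b := 10) (by omega)
      have hmm := PySem.Int.floordiv_mul_add_mod (PySem.Int.floordiv n 10) 10
      by_cases hm : PySem.Int.floordiv n 10 = -1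
      · exfalso
        rw [hm] at hab h10
        have : PySem.Int.mod (-1) 10 = 9 := by decide
        omega
      · exact ih _ (by omega) (by omega)
    · rw [if_neg hab]

-- ===== VERDICT (by name: the statement is the Claim_ definition above) =====
theorem is_monotone_spec : Claim_equal_is_monotone := by
  intro n _ hpre
  unfold Spec_is_monotone is_monotone is_monotone_alt
  by_cases hn : 0 ≤ n
  · rw [if_neg (by omega), isMonoFuel_nonneg _ n hn (by omega)]
  · have h2 : n ≤ -2 := by unfold Pre_is_monotone at hpre; omega
    rw [if_pos (by omega), isMonoFuel_neg _ n h2 (by omega)]
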